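-- pv_equiv track=rewrite | github.com/Leapense/problems | 16206번: Roll cake/test.py | max_ten_pieces
-- ===== SOURCE A (Python) =====
-- from typing import List, Tuple
--
-- def max_ten_pieces(cakes: List[int], max_cuts: int) -> int:
--     ready = sum(1 for length in cakes if length == 10)
--     divisible = [c for c in cakes if c > 10 and c % 10 == 0]
--     others = [c for c in cakes if c > 10 and c % 10 != 0]
--
--     divisible.sort()
--     pieces = ready
--     cuts = max_cuts
--
--     for length in divisible:
--         if cuts == 0:
--             break
--
--         ten_count = length // 10
--         need = ten_count - 1
--         if cuts >= need:
--             pieces += ten_count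
--             cuts -= need
--         else:
--             pieces += cuts
--             cuts = 0
--             break
--     if cuts > 0:
--         others.sort()
--         for length in others:
--             if cuts == 0:
--                 break
--             ten_count = length // 10
--             if ten_count == 0:
--                 continue
--             need = ten_count
--
--             if cuts >= need:
--                 pieces += ten_count
--                 cuts -= need
--             else:
--                 pieces += cuts
--                 cuts = 0
--                 break
--     return pieces
-- ===== SOURCE B (Python) =====
-- from typing import List
--
-- def max_ten_pieces(cakes: List[int], max_cuts: int) -> int:
--     ready = sum(1 for c in cakes if c == 10)
--     units = ([(c // 10 - 1, c // 10) for c in sorted(c for c in cakes if c > 10 and c % 10 == 0)]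
--              + [(c // 10, c // 10) for c in sorted(c for c in cakes if c > 10 and c % 10 != 0)])
--     prefix = [0]
--     for cost, _ in units:
--         prefix.append(prefix[-1] + cost)
--     budget = max(max_cuts, 0)
--     k = len(units)
--     for i in range(len(units)):
--         if prefix[i + 1] > budget:
--             k = i
--             break
--     total = ready + sum(p for _, p in units[:k])
--     if k < len(units):
--         total += budget - prefix[k]
--     return total
-- ===== Notes on version B (the rewrite author's own statement) =====
-- stated objective: alternative
-- what changed: Replaces A's two stateful greedy loops with early breaks by a data view: one sorted (cost,pieces) unit list, a prefix-sum array of costs, a scan for the cutoff index, and a closed-form total (affordable pieces plus leftover budget at the cutoff).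
-- intended difference: On inputs with max_cuts < 0 and at least one cake length > 10 divisible by 10, A returns ready + max_cuts (it adds the negative budget as 'partial pieces', yielding an impossible, possibly negative count), while B returns just the count of ready 10cm pieces, the intended value since no cuts can be made with a negative budget. — e.g. on max_ten_pieces([20], -1): A returns -1, B returns 0
import Mathlib
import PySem

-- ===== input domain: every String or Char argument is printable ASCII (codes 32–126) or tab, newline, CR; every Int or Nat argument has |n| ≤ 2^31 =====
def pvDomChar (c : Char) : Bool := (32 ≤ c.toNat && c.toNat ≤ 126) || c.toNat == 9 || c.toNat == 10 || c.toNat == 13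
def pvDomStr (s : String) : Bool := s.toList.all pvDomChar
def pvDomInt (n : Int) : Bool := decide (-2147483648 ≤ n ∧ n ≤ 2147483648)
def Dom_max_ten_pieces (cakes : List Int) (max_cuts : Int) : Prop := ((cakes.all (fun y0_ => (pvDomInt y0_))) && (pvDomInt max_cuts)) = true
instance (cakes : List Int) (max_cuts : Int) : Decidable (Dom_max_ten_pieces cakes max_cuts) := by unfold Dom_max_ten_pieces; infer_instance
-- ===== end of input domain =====

-- B replaces A's two stateful greedy loops by one sorted (cost,pieces) unit list with prefix
-- sums and a cutoff index (objective: alternative decomposition, same asymptotic cost).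

-- ===== PORT A =====
-- the 'for length in divisible' loop: state (pieces, cuts), early break returns the state
def pvLoopDiv : List Int → Int → Int → Int × Int
  | [], pieces, cuts => (pieces, cuts)
  | length :: rest, pieces, cuts =>
    if cuts = 0 then (pieces, cuts)
    else
      let ten_count := PySem.Int.floordiv length 10
      let need := ten_count - 1
      if need ≤ cuts then pvLoopDiv rest (pieces + ten_count) (cuts - need)
      else (pieces + cuts, 0)

-- the 'for length in others' loop (only pieces is returned after it)
def pvLoopOth : List Int → Int → Int → Int
  | [], pieces, _ => pieces
  | length :: rest, pieces, cuts =>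
    if cuts = 0 then pieces
    else
      let ten_count := PySem.Int.floordiv length 10
      if ten_count = 0 then pvLoopOth rest pieces cuts
      else if ten_count ≤ cuts then pvLoopOth rest (pieces + ten_count) (cuts - ten_count)
      else pieces + cuts

def max_ten_pieces (cakes : List Int) (max_cuts : Int) : Int :=
  let ready : Int := ((cakes.filter (fun length => length == 10)).length : Int)
  let divisible := cakes.filter (fun c => decide (10 < c) && (PySem.Int.mod c 10 == 0))
  let others := cakes.filter (fun c => decide (10 < c) && !(PySem.Int.mod c 10 == 0))
  let st := pvLoopDiv (PySem.List.sorted divisible (fun x => x) false) ready max_cuts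
  if 0 < st.2 then pvLoopOth (PySem.List.sorted others (fun x => x) false) st.1 st.2
  else st.1

-- ===== PORT B =====
-- Source B's unit list: (cost, pieces) per cuttable cake, sorted divisible first, then sorted others
def pvUnits (cakes : List Int) : List (Int × Int) :=
  ((PySem.List.sorted (cakes.filter (fun c => decide (10 < c) && (PySem.Int.mod c 10 == 0))) (fun x => x) false).map
     (fun c => (PySem.Int.floordiv c 10 - 1, PySem.Int.floordiv c 10)))
  ++ ((PySem.List.sorted (cakes.filter (fun c => decide (10 < c) && !(PySem.Int.mod c 10 == 0))) (fun x => x) false).map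
     (fun c => (PySem.Int.floordiv c 10, PySem.Int.floordiv c 10)))

-- Source B's prefix list minus its leading 0: running cumulative cost
def pvPrefix : List (Int × Int) → Int → List Int
  | [], _ => []
  | (cost, _) :: rest, acc => (acc + cost) :: pvPrefix rest (acc + cost)

-- Source B's cutoff scan: first i with prefix[i+1] > budget (length of the list if none)
def pvFindK : List Int → Int → Nat
  | [], _ => 0
  | p :: rest, budget => if budget < p then 0 else pvFindK rest budget + 1

def max_ten_pieces_alt (cakes : List Int) (max_cuts : Int) : Int :=
  let ready : Int := ((cakes.filter (fun c => c == 10)).length : Int)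
  let units := pvUnits cakes
  let pre := pvPrefix units 0
  let budget := max max_cuts 0
  let k := pvFindK pre budget
  let total := ready + ((units.take k).map Prod.snd).sum
  if k < units.length then total + (budget - ((0 : Int) :: pre).getD k 0)
  else total

-- ===== PRECONDITION & SPEC =====
-- On inputs with max_cuts < 0 and at least one cake length > 10 divisible by 10, A adds the
-- negative budget as "partial pieces" and returns ready + max_cuts; B returns just the count
-- of ready 10cm pieces, the intended value since no cuts can be made with a negative budget.
def D_max_ten_pieces (cakes : List Int) (max_cuts : Int) : Prop :=
  max_cuts < 0 ∧ ∃ c ∈ cakes, 10 < c ∧ PySem.Int.mod c 10 = 0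
instance (cakes : List Int) (max_cuts : Int) : Decidable (D_max_ten_pieces cakes max_cuts) := by
  unfold D_max_ten_pieces; infer_instance

def Spec_max_ten_pieces (cakes : List Int) (max_cuts : Int) (out : Int) : Prop :=
  ¬ D_max_ten_pieces cakes max_cuts → out = max_ten_pieces_alt cakes max_cuts
instance (cakes : List Int) (max_cuts : Int) (out : Int) : Decidable (Spec_max_ten_pieces cakes max_cuts out) := by
  unfold Spec_max_ten_pieces; infer_instance

def pvDiffWitness_max_ten_pieces : List Int × Int := ([20], -1)
def pvDiffWitnessOut_max_ten_pieces : Int × Int := (-1, 0)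

-- ===== CLAIM (what is proved, stated in full; the proofs are below) =====
def Claim_unchanged_max_ten_pieces : Prop := ∀ (cakes : List Int) (max_cuts : Int), Dom_max_ten_pieces cakes max_cuts → Spec_max_ten_pieces cakes max_cuts (max_ten_pieces cakes max_cuts)
def Claim_changed_max_ten_pieces : Prop := Dom_max_ten_pieces (pvDiffWitness_max_ten_pieces.1) (pvDiffWitness_max_ten_pieces.2) ∧ D_max_ten_pieces (pvDiffWitness_max_ten_pieces.1) (pvDiffWitness_max_ten_pieces.2) ∧ max_ten_pieces (pvDiffWitness_max_ten_pieces.1) (pvDiffWitness_max_ten_pieces.2) = pvDiffWitnessOut_max_ten_pieces.1 ∧ max_ten_pieces_alt (pvDiffWitness_max_ten_pieces.1) (pvDiffWitness_max_ten_pieces.2) = pvDiffWitnessOut_max_ten_pieces.2 ∧ pvDiffWitnessOut_max_ten_pieces.1 ≠ pvDiffWitnessOut_max_ten_pieces.2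
def Claim_exact_max_ten_pieces : Prop := ∀ (cakes : List Int) (max_cuts : Int), Dom_max_ten_pieces cakes max_cuts → D_max_ten_pieces cakes max_cuts → max_ten_pieces cakes max_cuts ≠ max_ten_pieces_alt cakes max_cuts

-- ===== LEMMAS AND PROOFS =====

-- the common greedy both programs implement: consume units while the budget covers the cost,
-- else add the leftover budget and stop
def pvGreedy : List (Int × Int) → Int → Int → Int
  | [], pieces, _ => pieces
  | (cost, pc) :: rest, pieces, cuts =>
    if cost ≤ cuts then pvGreedy rest (pieces + pc) (cuts - cost)
    else pieces + cuts

theorem pvPrefix_length (us : List (Int × Int)) (a : Int) : (pvPrefix us a).length = us.length := by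
  induction us generalizing a with
  | nil => rfl
  | cons u rest ih => cases u; simp [pvPrefix, ih]

theorem pvPrefix_shift (us : List (Int × Int)) (a b : Int) :
    pvPrefix us (a + b) = (pvPrefix us b).map (a + ·) := by
  induction us generalizing b with
  | nil => rfl
  | cons u rest ih =>
    cases u with
    | mk c pc =>
      simp only [pvPrefix, List.map_cons]
      rw [show a + b + c = a + (b + c) by ring, ih (b + c)]

theorem pvFindK_shift (l : List Int) (a x : Int) :
    pvFindK (l.map (a + ·)) x = pvFindK l (x - a) := by
  induction l with
  | nil => rfl
  | cons p rest ih =>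
    simp only [List.map_cons, pvFindK, ih]
    by_cases h : x - a < p
    · rw [if_pos h, if_pos (by omega)]
    · rw [if_neg h, if_neg (by omega)]

theorem pvFindK_le_length (l : List Int) (x : Int) : pvFindK l x ≤ l.length := by
  induction l with
  | nil => simp [pvFindK]
  | cons p rest ih =>
    simp only [pvFindK, List.length_cons]
    split
    · omega
    · omega

theorem pvGetD_cons_shift (l : List Int) (a : Int) (k : Nat) (hk : k ≤ l.length) :
    ((0 : Int) :: a :: l.map (a + ·)).getD (k + 1) 0 = a + (((0 : Int) :: l).getD k 0) := by
  cases k with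
  | zero => simp
  | succ j =>
    have hj : j < l.length := by omega
    simp [List.getD, List.getElem?_map, List.getElem?_eq_getElem hj]

-- B's prefix-sum/cutoff computation equals the greedy
theorem greedy_eq_cut (units : List (Int × Int)) (p budget : Int) :
    pvGreedy units p budget =
      (let pre := pvPrefix units 0
       let k := pvFindK pre budget
       let total := p + ((units.take k).map Prod.snd).sum
       if k < units.length then total + (budget - ((0 : Int) :: pre).getD k 0) else total) := by
  induction units generalizing p budget with
  | nil => simp [pvGreedy, pvPrefix, pvFindK]
  | cons u rest ih =>
    cases u with
    | mk cost pc =>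
      simp only [pvPrefix, pvFindK, zero_add]
      by_cases h : budget < cost
      · rw [if_pos h]
        simp [pvGreedy, if_neg (by omega : ¬ cost ≤ budget)]
      · rw [if_neg h]
        have hshift : pvPrefix rest cost = (pvPrefix rest 0).map (cost + ·) := by
          rw [show cost = cost + 0 by ring, pvPrefix_shift]; norm_num
        rw [hshift, pvFindK_shift]
        set k' := pvFindK (pvPrefix rest 0) (budget - cost) with hk'
        simp only [pvGreedy, if_pos (by omega : cost ≤ budget)]
        rw [ih (p + pc) (budget - cost)]
        simp only [List.take_succ_cons, List.map_cons, List.sum_cons, List.length_cons]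
        have hklen : k' ≤ rest.length := by
          rw [hk', ← pvPrefix_length rest (0 : Int)]
          exact pvFindK_le_length _ _
        rw [← hk']
        by_cases hlt : k' < rest.length
        · rw [if_pos (show k' + 1 < rest.length + 1 by omega),
            pvGetD_cons_shift (pvPrefix rest 0) cost k' (by rw [pvPrefix_length]; omega),
            if_pos hlt]
          ring
        · rw [if_neg (show ¬ k' + 1 < rest.length + 1 by omega), if_neg hlt]
          ring

theorem pvLoopOth_zero (l : List Int) (p : Int) : pvLoopOth l p 0 = p := by
  cases l <;> simp [pvLoopOth]

theorem pvLoopDiv_zero (l : List Int) (p : Int) : pvLoopDiv l p 0 = (p, 0) := by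
  cases l <;> simp [pvLoopDiv]

theorem floordiv_ten_pos {c : Int} (h : 10 < c) : 1 ≤ PySem.Int.floordiv c 10 := by
  rw [PySem.Int.floordiv_eq_ediv_of_pos (by norm_num)]
  omega

theorem floordiv_ten_ge_two {c : Int} (h : 10 < c) (hm : PySem.Int.mod c 10 = 0) :
    2 ≤ PySem.Int.floordiv c 10 := by
  rw [PySem.Int.mod_eq_zero_iff_dvd] at hm
  obtain ⟨m, hm⟩ := hm
  rw [PySem.Int.floordiv_eq_ediv_of_pos (by norm_num)]
  omega

theorem pvGreedy_zero (units : List (Int × Int)) (p : Int) (h : ∀ u ∈ units, 1 ≤ u.1) :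
    pvGreedy units p 0 = p := by
  cases units with
  | nil => rfl
  | cons u rest =>
    cases u with
    | mk cost pc =>
      have : 1 ≤ cost := h (cost, pc) (by simp)
      simp [pvGreedy, if_neg (by omega : ¬ cost ≤ (0:Int))]

-- A's others-loop (with its 'if cuts > 0' guard) is the greedy over the others units
theorem oth_eq_greedy (ot : List Int) (p cuts : Int) (h0 : 0 ≤ cuts)
    (hot : ∀ c ∈ ot, 10 < c) :
    (if 0 < cuts then pvLoopOth ot p cuts else p) =
      pvGreedy (ot.map (fun c => (PySem.Int.floordiv c 10, PySem.Int.floordiv c 10))) p cuts := by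
  induction ot generalizing p cuts with
  | nil => split <;> rfl
  | cons c rest ih =>
    have hc : 10 < c := hot c (by simp)
    have hten : 1 ≤ PySem.Int.floordiv c 10 := floordiv_ten_pos hc
    by_cases hpos : 0 < cuts
    · rw [if_pos hpos]
      simp only [pvLoopOth, if_neg (by omega : ¬ cuts = 0), if_neg (by omega : ¬ PySem.Int.floordiv c 10 = 0),
        List.map_cons, pvGreedy]
      by_cases hle : PySem.Int.floordiv c 10 ≤ cuts
      · rw [if_pos hle, if_pos hle]
        rw [← ih (p + PySem.Int.floordiv c 10) (cuts - PySem.Int.floordiv c 10) (by omega)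
            (fun x hx => hot x (by simp [hx]))]
        by_cases hz : 0 < cuts - PySem.Int.floordiv c 10
        · rw [if_pos hz]
        · rw [if_neg hz]
          have : cuts - PySem.Int.floordiv c 10 = 0 := by omega
          rw [this, pvLoopOth_zero]
      · rw [if_neg hle, if_neg hle]
    · rw [if_neg hpos]
      have : cuts = 0 := by omega
      subst this
      refine (pvGreedy_zero _ p ?_).symm
      intro u hu
      obtain ⟨x, hx, rfl⟩ := List.mem_map.mp hu
      exact floordiv_ten_pos (hot x hx)

-- the whole of A (after computing ready and the two sorted lists) is the greedy over the units
theorem a_eq_greedy (dv ot : List Int) (p cuts : Int) (h0 : 0 ≤ cuts)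
    (hdv : ∀ c ∈ dv, 10 < c ∧ PySem.Int.mod c 10 = 0) (hot : ∀ c ∈ ot, 10 < c) :
    (if 0 < (pvLoopDiv dv p cuts).2 then pvLoopOth ot (pvLoopDiv dv p cuts).1 (pvLoopDiv dv p cuts).2
     else (pvLoopDiv dv p cuts).1) =
      pvGreedy ((dv.map (fun c => (PySem.Int.floordiv c 10 - 1, PySem.Int.floordiv c 10)))
        ++ (ot.map (fun c => (PySem.Int.floordiv c 10, PySem.Int.floordiv c 10)))) p cuts := by
  induction dv generalizing p cuts with
  | nil =>
    simp only [pvLoopDiv, List.map_nil, List.nil_append]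
    exact oth_eq_greedy ot p cuts h0 hot
  | cons c rest ih =>
    have hc := hdv c (by simp)
    have hten : 2 ≤ PySem.Int.floordiv c 10 := floordiv_ten_ge_two hc.1 hc.2
    by_cases hz : cuts = 0
    · subst hz
      rw [pvLoopDiv_zero]
      refine Eq.symm (pvGreedy_zero _ p ?_)
      intro u hu
      rcases List.mem_append.mp hu with hmem | hmem
      · obtain ⟨x, hx, rfl⟩ := List.mem_map.mp hmem
        have hx' := hdv x hx
        have := floordiv_ten_ge_two hx'.1 hx'.2
        simp only []
        omega
      · obtain ⟨x, hx, rfl⟩ := List.mem_map.mp hmem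
        exact floordiv_ten_pos (hot x hx)
    · simp only [pvLoopDiv, if_neg hz, List.map_cons, List.cons_append, pvGreedy]
      by_cases hle : PySem.Int.floordiv c 10 - 1 ≤ cuts
      · rw [if_pos hle, if_pos hle]
        exact ih (p + PySem.Int.floordiv c 10) (cuts - (PySem.Int.floordiv c 10 - 1)) (by omega)
          (fun x hx => hdv x (by simp [hx]))
      · rw [if_neg hle, if_neg hle]
        simp

theorem units_cost_pos (cakes : List Int) : ∀ u ∈ pvUnits cakes, 1 ≤ u.1 := by
  intro u hu
  unfold pvUnits at hu
  rcases List.mem_append.mp hu with h | h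
  · obtain ⟨c, hc, rfl⟩ := List.mem_map.mp h
    rw [PySem.List.mem_sorted] at hc
    have h2 := (List.mem_filter.mp hc).2
    simp only [Bool.and_eq_true, decide_eq_true_eq, beq_iff_eq] at h2
    have := floordiv_ten_ge_two h2.1 h2.2
    simp only []
    omega
  · obtain ⟨c, hc, rfl⟩ := List.mem_map.mp h
    rw [PySem.List.mem_sorted] at hc
    have h2 := (List.mem_filter.mp hc).2
    simp only [Bool.and_eq_true, decide_eq_true_eq] at h2
    exact floordiv_ten_pos h2.1

-- B equals the greedy over the units with the clamped budget
theorem b_eq_greedy (cakes : List Int) (max_cuts : Int) :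
    max_ten_pieces_alt cakes max_cuts =
      pvGreedy (pvUnits cakes) ((cakes.filter (fun c => c == 10)).length : Int) (max max_cuts 0) := by
  rw [greedy_eq_cut]; rfl

-- A written with its lets zeta-expanded (definitional)
theorem a_def (cakes : List Int) (max_cuts : Int) :
    max_ten_pieces cakes max_cuts =
      (if 0 < (pvLoopDiv (PySem.List.sorted (cakes.filter (fun c => decide (10 < c) && (PySem.Int.mod c 10 == 0))) (fun x => x) false) ((cakes.filter (fun length => length == 10)).length : Int) max_cuts).2
       then pvLoopOth (PySem.List.sorted (cakes.filter (fun c => decide (10 < c) && !(PySem.Int.mod c 10 == 0))) (fun x => x) false)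
              (pvLoopDiv (PySem.List.sorted (cakes.filter (fun c => decide (10 < c) && (PySem.Int.mod c 10 == 0))) (fun x => x) false) ((cakes.filter (fun length => length == 10)).length : Int) max_cuts).1
              (pvLoopDiv (PySem.List.sorted (cakes.filter (fun c => decide (10 < c) && (PySem.Int.mod c 10 == 0))) (fun x => x) false) ((cakes.filter (fun length => length == 10)).length : Int) max_cuts).2
       else (pvLoopDiv (PySem.List.sorted (cakes.filter (fun c => decide (10 < c) && (PySem.Int.mod c 10 == 0))) (fun x => x) false) ((cakes.filter (fun length => length == 10)).length : Int) max_cuts).1) := rfl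

theorem sorted_div_mem (cakes : List Int) :
    ∀ c ∈ PySem.List.sorted (cakes.filter (fun c => decide (10 < c) && (PySem.Int.mod c 10 == 0))) (fun x => x) false,
      10 < c ∧ PySem.Int.mod c 10 = 0 := by
  intro c hc
  rw [PySem.List.mem_sorted] at hc
  have h2 := (List.mem_filter.mp hc).2
  simpa using h2

theorem sorted_oth_mem (cakes : List Int) :
    ∀ c ∈ PySem.List.sorted (cakes.filter (fun c => decide (10 < c) && !(PySem.Int.mod c 10 == 0))) (fun x => x) false,
      10 < c := by
  intro c hc
  rw [PySem.List.mem_sorted] at hc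
  have h2 := (List.mem_filter.mp hc).2
  simp only [Bool.and_eq_true, decide_eq_true_eq] at h2
  exact h2.1

theorem main_eq (cakes : List Int) (max_cuts : Int) (h : ¬ D_max_ten_pieces cakes max_cuts) :
    max_ten_pieces cakes max_cuts = max_ten_pieces_alt cakes max_cuts := by
  rw [b_eq_greedy, a_def]
  by_cases hm : 0 ≤ max_cuts
  · rw [max_eq_left hm]
    exact a_eq_greedy _ _ _ max_cuts hm (sorted_div_mem cakes) (sorted_oth_mem cakes)
  · unfold D_max_ten_pieces at h
    push Not at h
    have hmc : max_cuts < 0 := by omega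
    have hdvnil : cakes.filter (fun c => decide (10 < c) && (PySem.Int.mod c 10 == 0)) = [] := by
      rw [List.filter_eq_nil_iff]
      intro c hc
      simp only [Bool.and_eq_true, decide_eq_true_eq, beq_iff_eq, not_and]
      exact fun h10 => h hmc c hc h10
    rw [hdvnil]
    rw [show PySem.List.sorted ([] : List Int) (fun x => x) false = [] from rfl]
    rw [show pvLoopDiv [] ((cakes.filter (fun length => length == 10)).length : Int) max_cuts
        = (((cakes.filter (fun length => length == 10)).length : Int), max_cuts) from rfl]
    rw [if_neg (by simpa using not_lt.mpr (le_of_lt hmc))]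
    rw [max_eq_right (le_of_lt hmc), pvGreedy_zero _ _ (units_cost_pos cakes)]

-- ===== VERDICT (by name: the statement is the Claim_ definition above) =====
theorem max_ten_pieces_spec : Claim_unchanged_max_ten_pieces := by
  intro cakes max_cuts _ hD
  exact (main_eq cakes max_cuts hD).symm ▸ rfl

theorem max_ten_pieces_changed : Claim_changed_max_ten_pieces := by
  unfold Claim_changed_max_ten_pieces; decide

theorem max_ten_pieces_tight : Claim_exact_max_ten_pieces := by
  intro cakes max_cuts _ hD
  obtain ⟨hmc, c, hcmem, hc10, hcmod⟩ := hD
  have hA : max_ten_pieces cakes max_cuts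
      = ((cakes.filter (fun length => length == 10)).length : Int) + max_cuts := by
    rw [a_def]
    have hne : PySem.List.sorted (cakes.filter (fun c => decide (10 < c) && (PySem.Int.mod c 10 == 0))) (fun x => x) false ≠ [] := by
      intro hnil
      have : c ∈ PySem.List.sorted (cakes.filter (fun c => decide (10 < c) && (PySem.Int.mod c 10 == 0))) (fun x => x) false := by
        rw [PySem.List.mem_sorted, List.mem_filter]
        exact ⟨hcmem, by simp [hc10]; rw [← PySem.Int.mod_eq_zero_iff_dvd]; exact hcmod⟩
      rw [hnil] at this
      exact absurd this (List.not_mem_nil)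
    obtain ⟨c0, t, hct⟩ := List.exists_cons_of_ne_nil hne
    have hc0 := sorted_div_mem cakes c0 (by rw [hct]; exact List.mem_cons_self)
    have hten : 2 ≤ PySem.Int.floordiv c0 10 := floordiv_ten_ge_two hc0.1 hc0.2
    rw [hct]
    rw [show pvLoopDiv (c0 :: t) ((cakes.filter (fun length => length == 10)).length : Int) max_cuts
        = (((cakes.filter (fun length => length == 10)).length : Int) + max_cuts, 0) from by
      simp only [pvLoopDiv, if_neg (show ¬ max_cuts = 0 by omega),
        if_neg (show ¬ PySem.Int.floordiv c0 10 - 1 ≤ max_cuts by omega)]]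
    simp
  have hB : max_ten_pieces_alt cakes max_cuts
      = ((cakes.filter (fun c => c == 10)).length : Int) := by
    rw [b_eq_greedy, max_eq_right (le_of_lt hmc), pvGreedy_zero _ _ (units_cost_pos cakes)]
  rw [hA, hB]
  omega
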